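-- pv_equiv track=rewrite | github.com/Niyath1234/spyne-ide | backend/services/drift_detection.py | _get_type_change_severity
-- ===== SOURCE A (Python) =====
-- from enum import Enum
--
-- class DriftSeverity(str, Enum):
--     """Drift severity levels."""
--     COMPATIBLE = "COMPATIBLE"  # Safe, auto-apply
--     WARNING = "WARNING"  # Needs review, allow override
--     BREAKING = "BREAKING"  # Blocks promotion, require new version
--
-- def _get_type_change_severity(old_type: str, new_type: str) -> DriftSeverity:
--     """Determine severity of type change."""
--     # Type widening (safe)
--     widening_map = {
--         'INT': ['BIGINT'],
--         'VARCHAR': ['TEXT'],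
--         'FLOAT': ['DOUBLE'],
--     }
--
--     for base_type, wider_types in widening_map.items():
--         if old_type.upper() == base_type and new_type.upper() in wider_types:
--             return DriftSeverity.COMPATIBLE
--
--     # Type narrowing (warning)
--     narrowing_map = {
--         'BIGINT': ['INT'],
--         'TEXT': ['VARCHAR'],
--         'DOUBLE': ['FLOAT'],
--     }
--
--     for base_type, narrower_types in narrowing_map.items():
--         if old_type.upper() == base_type and new_type.upper() in narrower_types:
--             return DriftSeverity.WARNING
--
--     # Other type changes (breaking)
--     return DriftSeverity.BREAKING
-- ===== SOURCE B (Python) =====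
-- from enum import Enum
--
-- class DriftSeverity(str, Enum):
--     COMPATIBLE = "COMPATIBLE"
--     WARNING = "WARNING"
--     BREAKING = "BREAKING"
--
-- # Each known SQL type sits on a widening ladder: (family, rank). A change within one
-- # family is COMPATIBLE if the rank goes up (widening), WARNING if it goes down
-- # (narrowing); anything else (unknown type, other family, same rank) is BREAKING.
-- _TYPE_LADDER = {
--     'INT': ('integer', 1), 'BIGINT': ('integer', 2),
--     'VARCHAR': ('chars', 1), 'TEXT': ('chars', 2),
--     'FLOAT': ('real', 1), 'DOUBLE': ('real', 2),
-- }
--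
-- def _get_type_change_severity(old_type: str, new_type: str) -> DriftSeverity:
--     """Determine severity of type change by comparing ladder ranks."""
--     old = _TYPE_LADDER.get(old_type.upper())
--     new = _TYPE_LADDER.get(new_type.upper())
--     if old is None or new is None or old[0] != new[0]:
--         return DriftSeverity.BREAKING
--     if old[1] < new[1]:
--         return DriftSeverity.COMPATIBLE
--     if old[1] > new[1]:
--         return DriftSeverity.WARNING
--     return DriftSeverity.BREAKING
-- ===== Notes on version B (the rewrite author's own statement) =====
-- stated objective: alternative
-- what changed: Replaces A's enumeration of the six (old,new) pairs in two scanning loops by a per-type lookup assigning each type a (family, rank) on a widening ladder, then classifies by comparing the two ranks within a family; the pair tables disappear entirely.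
import Mathlib
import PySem

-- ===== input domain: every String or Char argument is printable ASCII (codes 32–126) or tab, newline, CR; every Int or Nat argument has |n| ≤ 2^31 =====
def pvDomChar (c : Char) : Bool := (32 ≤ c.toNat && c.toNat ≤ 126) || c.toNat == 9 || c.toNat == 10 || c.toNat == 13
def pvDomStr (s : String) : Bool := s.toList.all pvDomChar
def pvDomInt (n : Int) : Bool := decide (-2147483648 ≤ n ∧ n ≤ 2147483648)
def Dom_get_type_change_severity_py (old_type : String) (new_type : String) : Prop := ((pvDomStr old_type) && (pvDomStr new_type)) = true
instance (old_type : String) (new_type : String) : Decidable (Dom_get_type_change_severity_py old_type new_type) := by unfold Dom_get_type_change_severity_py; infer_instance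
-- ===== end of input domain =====

-- B drops A's two pair-enumeration loops: each type gets a (family, rank) on a widening
-- ladder, and the severity falls out of comparing the two ranks within a family.

-- ===== PORT A =====
-- A's first loop: scan the widening map in insertion order, early return on a match
def pvScanA (u v : String) : List (String × List String) → Option String
  | [] => none
  | (base, wider) :: rest =>
      if u == base && v ∈ wider then some "COMPATIBLE" else pvScanA u v rest

-- A's second loop over the narrowing map
def pvScanA2 (u v : String) : List (String × List String) → Option String
  | [] => none
  | (base, narrower) :: rest =>
      if u == base && v ∈ narrower then some "WARNING" else pvScanA2 u v rest

def get_type_change_severity_py (old_type : String) (new_type : String) : String :=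
  match pvScanA (PySem.Str.upper old_type) (PySem.Str.upper new_type)
      [("INT", ["BIGINT"]), ("VARCHAR", ["TEXT"]), ("FLOAT", ["DOUBLE"])] with
  | some r => r
  | none =>
    match pvScanA2 (PySem.Str.upper old_type) (PySem.Str.upper new_type)
        [("BIGINT", ["INT"]), ("TEXT", ["VARCHAR"]), ("DOUBLE", ["FLOAT"])] with
    | some r => r
    | none => "BREAKING"

-- ===== PORT B =====
def pvTypeLadder : PySem.Dict String (String × Int) :=
  PySem.Dict.mk
  [("INT", ("integer", 1)), ("BIGINT", ("integer", 2)),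
   ("VARCHAR", ("chars", 1)), ("TEXT", ("chars", 2)),
   ("FLOAT", ("real", 1)), ("DOUBLE", ("real", 2))]

def get_type_change_severity_py_alt (old_type : String) (new_type : String) : String :=
  match PySem.Dict.get? pvTypeLadder (PySem.Str.upper old_type),
        PySem.Dict.get? pvTypeLadder (PySem.Str.upper new_type) with
  | some o, some n =>
      if o.1 ≠ n.1 then "BREAKING"
      else if o.2 < n.2 then "COMPATIBLE"
      else if o.2 > n.2 then "WARNING"
      else "BREAKING"
  | _, _ => "BREAKING"

-- ===== PRECONDITION & SPEC =====
def Spec_get_type_change_severity_py (old_type : String) (new_type : String) (out : String) : Prop := out = get_type_change_severity_py_alt old_type new_type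
instance (old_type : String) (new_type : String) (out : String) : Decidable (Spec_get_type_change_severity_py old_type new_type out) := by unfold Spec_get_type_change_severity_py; infer_instance

-- ===== CLAIM =====
def Claim_equal_get_type_change_severity_py : Prop := ∀ (old_type : String) (new_type : String), Dom_get_type_change_severity_py old_type new_type → Spec_get_type_change_severity_py old_type new_type (get_type_change_severity_py old_type new_type)

-- ===== LEMMAS AND PROOFS =====
-- a string that is none of the six ladder keys is not in the ladder
lemma pv_get_none (v : String) (g1 : v ≠ "INT") (g2 : v ≠ "BIGINT") (g3 : v ≠ "VARCHAR")
    (g4 : v ≠ "TEXT") (g5 : v ≠ "FLOAT") (g6 : v ≠ "DOUBLE") :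
    PySem.Dict.get? pvTypeLadder v = none := by
  simp [pvTypeLadder, PySem.Dict.get?, List.find?,
    beq_eq_false_iff_ne.mpr (Ne.symm g1), beq_eq_false_iff_ne.mpr (Ne.symm g2),
    beq_eq_false_iff_ne.mpr (Ne.symm g3), beq_eq_false_iff_ne.mpr (Ne.symm g4),
    beq_eq_false_iff_ne.mpr (Ne.symm g5), beq_eq_false_iff_ne.mpr (Ne.symm g6)]

-- core fact: A's two scans over the fixed maps compute exactly B's ladder-rank comparison, for ANY pair (u, v)
set_option maxHeartbeats 2000000 in
lemma pv_core (u v : String) :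
    (match pvScanA u v [("INT", ["BIGINT"]), ("VARCHAR", ["TEXT"]), ("FLOAT", ["DOUBLE"])] with
     | some r => r
     | none =>
       match pvScanA2 u v [("BIGINT", ["INT"]), ("TEXT", ["VARCHAR"]), ("DOUBLE", ["FLOAT"])] with
       | some r => r
       | none => "BREAKING")
    = (match PySem.Dict.get? pvTypeLadder u, PySem.Dict.get? pvTypeLadder v with
       | some o, some n =>
           if o.1 ≠ n.1 then "BREAKING"
           else if o.2 < n.2 then "COMPATIBLE"
           else if o.2 > n.2 then "WARNING"
           else "BREAKING"
       | _, _ => "BREAKING") := by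
  have hu : u = "INT" ∨ u = "BIGINT" ∨ u = "VARCHAR" ∨ u = "TEXT" ∨ u = "FLOAT" ∨ u = "DOUBLE" ∨
      (u ≠ "INT" ∧ u ≠ "BIGINT" ∧ u ≠ "VARCHAR" ∧ u ≠ "TEXT" ∧ u ≠ "FLOAT" ∧ u ≠ "DOUBLE") := by tauto
  have hv : v = "INT" ∨ v = "BIGINT" ∨ v = "VARCHAR" ∨ v = "TEXT" ∨ v = "FLOAT" ∨ v = "DOUBLE" ∨
      (v ≠ "INT" ∧ v ≠ "BIGINT" ∧ v ≠ "VARCHAR" ∧ v ≠ "TEXT" ∧ v ≠ "FLOAT" ∧ v ≠ "DOUBLE") := by tauto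
  rcases hu with h|h|h|h|h|h|⟨h1,h2,h3,h4,h5,h6⟩ <;>
    rcases hv with g|g|g|g|g|g|⟨g1,g2,g3,g4,g5,g6⟩ <;>
    subst_vars <;>
    first
      | decide
      | (rw [pv_get_none u h1 h2 h3 h4 h5 h6, pv_get_none v g1 g2 g3 g4 g5 g6]
         simp [pvScanA, pvScanA2, *])
      | (rw [pv_get_none u h1 h2 h3 h4 h5 h6]
         simp [pvScanA, pvScanA2, beq_iff_eq, *])
      | (rw [pv_get_none v g1 g2 g3 g4 g5 g6]
         simp [pvScanA, pvScanA2, pvTypeLadder, PySem.Dict.get?, List.find?, *])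

-- ===== VERDICT =====
theorem get_type_change_severity_py_spec : Claim_equal_get_type_change_severity_py := by
  intro old_type new_type _
  unfold Spec_get_type_change_severity_py get_type_change_severity_py get_type_change_severity_py_alt
  exact pv_core _ _
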